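-- pv_equiv track=rewrite | github.com/josephtkim/CS229-final-project | utils.py | clean_and_validate_attributes
-- ===== SOURCE A (Python) =====
-- def remove_punc_special(text):
--     return ''.join(char.lower() for char in text if char.isalpha() or char.isspace())
--
-- def clean_and_validate_attributes(text_list):
--     valid_attributes = {
--         'young', 'male', 'female', 'smiling', 'eyeglasses',
--         'black hair', 'blond hair', 'bald', 'mustache', 'wearing lipstick'
--     }
--     cleaned_words = []
--     for text in text_list:
--         cleaned_text = remove_punc_special(text)
--         cleaned_words.extend(cleaned_text.split())
--
--     found_attributes = []
--     i = 0
--     while i < len(cleaned_words):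
--         if i < len(cleaned_words)-1:
--             two_words = f"{cleaned_words[i]} {cleaned_words[i+1]}"
--             if two_words in valid_attributes:
--                 found_attributes.append(two_words)
--                 i+=2
--                 continue
--         if cleaned_words[i] in valid_attributes:
--             found_attributes.append(cleaned_words[i])
--         i+=1
--     return found_attributes
-- ===== SOURCE B (Python) =====
-- # Valid attributes as an ordered pattern list: two-word attributes first, so the
-- # longest match wins at each word boundary (same greedy preference as the spec).
-- PATTERNS = ['wearing lipstick', 'black hair', 'blond hair',
--             'young', 'male', 'female', 'smiling', 'eyeglasses', 'bald', 'mustache']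
--
-- def clean_and_validate_attributes(text_list):
--     words = []
--     for text in text_list:
--         words.extend(''.join(c.lower() for c in text if c.isalpha() or c.isspace()).split())
--     s = ' '.join(words)
--     found = []
--     p = 0
--     n = len(s)
--     while p < n:
--         if p == 0 or s[p - 1] == ' ':
--             for pat in PATTERNS:
--                 end = p + len(pat)
--                 if s.startswith(pat, p) and (end == n or s[end] == ' '):
--                     found.append(pat)
--                     p = end
--                     break
--             else:
--                 p += 1
--         else:
--             p += 1
--     return found
-- ===== Notes on version B (the rewrite author's own statement) =====
-- stated objective: alternative
-- what changed: Instead of A's index-advancing greedy scan over the word list (bigram lookup in a set, i+=2 skips), B joins the cleaned words into one space-separated string and runs a hand-rolled leftmost-longest textual matcher over character positions: at each word boundary it tries an ordered pattern list (two-word attributes first) with startswith and a boundary check after the match, jumping past each match.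
import Mathlib
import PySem

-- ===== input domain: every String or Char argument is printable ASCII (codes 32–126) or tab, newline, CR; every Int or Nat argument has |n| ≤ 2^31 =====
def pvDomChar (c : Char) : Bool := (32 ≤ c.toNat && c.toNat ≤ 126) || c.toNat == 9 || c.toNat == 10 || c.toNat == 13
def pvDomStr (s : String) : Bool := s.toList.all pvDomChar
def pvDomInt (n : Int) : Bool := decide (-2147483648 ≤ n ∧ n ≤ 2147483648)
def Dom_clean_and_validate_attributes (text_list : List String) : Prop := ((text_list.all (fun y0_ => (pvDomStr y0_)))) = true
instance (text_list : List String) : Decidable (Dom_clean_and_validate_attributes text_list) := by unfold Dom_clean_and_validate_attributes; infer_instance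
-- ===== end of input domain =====

set_option maxRecDepth 8192


-- B replaces A's index-advancing greedy scan over the word list by a textual matcher:
-- it joins the cleaned words into one string and scans that string by character position
-- with an ordered pattern list (two-word attributes first) and word-boundary checks.
-- Objective: alternative algorithm of similar cost.

-- ===== PORT A =====

-- ''.join(char.lower() for char in text if char.isalpha() or char.isspace())
def remove_punc_special (text : String) : String :=
  String.ofList ((text.toList.filter
    (fun c => PySem.Chars.isalpha c || PySem.Chars.isspace c)).map PySem.Chars.lowerChar)

-- the set literal of valid attributes
def pvValidAttributes : PySem.Set String := PySem.Set.ofList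
  ["young", "male", "female", "smiling", "eyeglasses",
   "black hair", "blond hair", "bald", "mustache", "wearing lipstick"]

-- the while-loop over index i, accumulator found_attributes
def aScan (ws : List String) (i : Nat) (acc : List String) : List String :=
  if _h : i < ws.length then
    if i < ws.length - 1 then
      let two := ws.getD i "" ++ " " ++ ws.getD (i + 1) ""
      if PySem.Set.contains pvValidAttributes two then aScan ws (i + 2) (acc ++ [two])
      else aScan ws (i + 1)
        (if PySem.Set.contains pvValidAttributes (ws.getD i "") then acc ++ [ws.getD i ""] else acc)
    else aScan ws (i + 1)
      (if PySem.Set.contains pvValidAttributes (ws.getD i "") then acc ++ [ws.getD i ""] else acc)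
  else acc
termination_by ws.length - i

def clean_and_validate_attributes (text_list : List String) : List String :=
  let cleaned_words :=
    text_list.foldl (fun acc text => acc ++ PySem.Str.split₀ (remove_punc_special text)) []
  aScan cleaned_words 0 []

-- ===== PORT B =====

-- PATTERNS, the ordered list of valid attributes, two-word attributes first
def pvPatternsC : List (List Char) :=
  ["wearing lipstick".toList, "black hair".toList, "blond hair".toList,
   "young".toList, "male".toList, "female".toList, "smiling".toList,
   "eyeglasses".toList, "bald".toList, "mustache".toList]

-- every pattern is nonempty (used only for termination of bScan)
theorem pvPatternsC_pos : ∀ pat ∈ pvPatternsC, 0 < pat.length := by decide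

-- the for…else over PATTERNS at position p: the first pattern pat with
-- s.startswith(pat, p) (exact here: pat is a prefix of s[p:], since 0 ≤ p < len(s)) and
-- (p + len(pat) == len(s) or s[p + len(pat)] == ' ')
def bMatchAt (s : List Char) (p : Nat) : Option (List Char) :=
  pvPatternsC.find? (fun pat =>
    pat.isPrefixOf (s.drop p) && (p + pat.length == s.length || s.getD (p + pat.length) 'a' == ' '))

-- the while-loop over character position p, accumulator found
def bScan (s : List Char) (p : Nat) (found : List String) : List String :=
  if _h : p < s.length then
    if p == 0 || s.getD (p - 1) 'a' == ' ' then
      match hm : bMatchAt s p with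
      | some pat => bScan s (p + pat.length) (found ++ [String.ofList pat])
      | none => bScan s (p + 1) found
    else bScan s (p + 1) found
  else found
termination_by s.length - p
decreasing_by
  · have := pvPatternsC_pos pat (List.mem_of_find?_eq_some (by simpa [bMatchAt] using hm))
    omega
  · omega
  · omega

def clean_and_validate_attributes_alt (text_list : List String) : List String :=
  let words := text_list.foldl (fun acc text => acc ++ PySem.Str.split₀ (remove_punc_special text)) []
  let s := PySem.Chars.join [' '] (words.map String.toList)   -- ' '.join(words)
  bScan s 0 []

-- ===== PRECONDITION & SPEC =====
def Spec_clean_and_validate_attributes (text_list : List String) (out : List String) : Prop := out = clean_and_validate_attributes_alt text_list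
instance (text_list : List String) (out : List String) : Decidable (Spec_clean_and_validate_attributes text_list out) := by unfold Spec_clean_and_validate_attributes; infer_instance

-- ===== CLAIM (what is proved, stated in full; the proofs are below) =====
def Claim_equal_clean_and_validate_attributes : Prop := ∀ (text_list : List String), Dom_clean_and_validate_attributes text_list → Spec_clean_and_validate_attributes text_list (clean_and_validate_attributes text_list)

-- ===== LEMMAS AND PROOFS =====

-- a word is "good" when it is nonempty and contains no space character
def pvGood (w : List Char) : Prop := w ≠ [] ∧ (' ' : Char) ∉ w

-- word-level greedy scan: the common abstraction both ports are reduced to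
def wScan : List (List Char) → List (List Char)
  | [] => []
  | w :: rest =>
    match rest with
    | n :: rs =>
      if PySem.Set.contains pvValidAttributes (String.ofList (w ++ ' ' :: n)) then
        (w ++ ' ' :: n) :: wScan rs
      else (if PySem.Set.contains pvValidAttributes (String.ofList w) then [w] else [])
        ++ wScan (n :: rs)
    | [] => if PySem.Set.contains pvValidAttributes (String.ofList w) then [w] else []

theorem pv_set_mem (v : List Char) :
    PySem.Set.contains pvValidAttributes (String.ofList v) = true ↔
      (v = "young".toList ∨ v = "male".toList ∨ v = "female".toList ∨ v = "smiling".toList ∨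
       v = "eyeglasses".toList ∨ v = "black hair".toList ∨ v = "blond hair".toList ∨
       v = "bald".toList ∨ v = "mustache".toList ∨ v = "wearing lipstick".toList) := by
  simp only [PySem.Set.contains, pvValidAttributes, List.contains_iff_mem, PySem.Set.mem_ofList,
    List.mem_cons, List.not_mem_nil, or_false, ← String.toList_inj, String.toList_ofList]

theorem pv_two_inj (w n x y : List Char) (hw : (' ' : Char) ∉ w) (hx : (' ' : Char) ∉ x) :
    (w ++ ' ' :: n = x ++ ' ' :: y) ↔ (w = x ∧ n = y) := by
  constructor
  · intro h
    have hlen : w.length = x.length := by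
      by_contra hne
      rcases Nat.lt_or_ge w.length x.length with hlt | hge
      · have h1 : (w ++ ' ' :: n)[w.length]? = some ' ' := by
          rw [List.getElem?_append_right (le_refl _)]; simp
        rw [h, List.getElem?_append_left hlt] at h1
        exact hx (List.mem_of_getElem? h1)
      · have hlt : x.length < w.length := by omega
        have h1 : (x ++ ' ' :: y)[x.length]? = some ' ' := by
          rw [List.getElem?_append_right (le_refl _)]; simp
        rw [← h, List.getElem?_append_left hlt] at h1
        exact hw (List.mem_of_getElem? h1)
    obtain ⟨h1, h2⟩ := List.append_inj h hlen
    exact ⟨h1, by simpa using h2⟩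
  · rintro ⟨rfl, rfl⟩; rfl

theorem pv_contains_two (w n : List Char) (hw : (' ' : Char) ∉ w) :
    PySem.Set.contains pvValidAttributes (String.ofList (w ++ ' ' :: n))
      = (decide (w = "wearing".toList ∧ n = "lipstick".toList)
         || decide (w = "black".toList ∧ n = "hair".toList)
         || decide (w = "blond".toList ∧ n = "hair".toList)) := by
  rw [Bool.eq_iff_iff, pv_set_mem]
  simp only [Bool.or_eq_true, decide_eq_true_eq]
  have hsp : ∀ (z : List Char), (' ' : Char) ∉ z → w ++ ' ' :: n ≠ z := by
    intro z hz h; exact hz (h ▸ (by simp))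
  constructor
  · rintro (h|h|h|h|h|h|h|h|h|h)
    · exact absurd h (hsp _ (by decide))
    · exact absurd h (hsp _ (by decide))
    · exact absurd h (hsp _ (by decide))
    · exact absurd h (hsp _ (by decide))
    · exact absurd h (hsp _ (by decide))
    · have hb : (' ' : Char) ∉ "black".toList := by decide
      rw [show "black hair".toList = "black".toList ++ ' ' :: "hair".toList from by decide,
        pv_two_inj w n "black".toList "hair".toList hw hb] at h
      tauto
    · have hb : (' ' : Char) ∉ "blond".toList := by decide
      rw [show "blond hair".toList = "blond".toList ++ ' ' :: "hair".toList from by decide,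
        pv_two_inj w n "blond".toList "hair".toList hw hb] at h
      tauto
    · exact absurd h (hsp _ (by decide))
    · exact absurd h (hsp _ (by decide))
    · have hb : (' ' : Char) ∉ "wearing".toList := by decide
      rw [show "wearing lipstick".toList = "wearing".toList ++ ' ' :: "lipstick".toList from by decide,
        pv_two_inj w n "wearing".toList "lipstick".toList hw hb] at h
      tauto
  · rintro ((⟨rfl, rfl⟩ | ⟨rfl, rfl⟩) | ⟨rfl, rfl⟩) <;> decide

theorem pv_contains_one (w : List Char) (hw : (' ' : Char) ∉ w) :
    PySem.Set.contains pvValidAttributes (String.ofList w)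
      = (decide (w = "young".toList) || decide (w = "male".toList) || decide (w = "female".toList)
         || decide (w = "smiling".toList) || decide (w = "eyeglasses".toList)
         || decide (w = "bald".toList) || decide (w = "mustache".toList)) := by
  rw [Bool.eq_iff_iff, pv_set_mem]
  simp only [Bool.or_eq_true, decide_eq_true_eq]
  have hsp : ∀ (z : List Char), (' ' : Char) ∈ z → w ≠ z := by
    intro z hz h; exact hw (h ▸ hz)
  constructor
  · rintro (h|h|h|h|h|h|h|h|h|h)
    · tauto
    · tauto
    · tauto
    · tauto
    · tauto
    · exact absurd h (hsp _ (by decide))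
    · exact absurd h (hsp _ (by decide))
    · tauto
    · tauto
    · exact absurd h (hsp _ (by decide))
  · rintro ((((((rfl|rfl)|rfl)|rfl)|rfl)|rfl)|rfl) <;> decide

-- pieces produced by split() are nonempty and whitespace-free
theorem pv_go_good : ∀ (s cur : List Char) (acc : List (List Char)),
    (∀ c ∈ cur, PySem.Chars.isspace c = false) →
    (∀ q ∈ acc, q ≠ [] ∧ ∀ c ∈ q, PySem.Chars.isspace c = false) →
    ∀ q ∈ PySem.Chars.split₀.go s cur acc, q ≠ [] ∧ ∀ c ∈ q, PySem.Chars.isspace c = false := by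
  intro s
  induction s with
  | nil =>
    intro cur acc hc ha q hq
    rw [PySem.Chars.split₀.go.eq_def] at hq
    dsimp only [] at hq
    by_cases he : cur.isEmpty
    · rw [if_pos he, List.mem_reverse] at hq; exact ha q hq
    · rw [if_neg he, List.mem_reverse, List.mem_cons] at hq
      rcases hq with rfl | hq
      · refine ⟨by simpa using (List.isEmpty_eq_false_iff ..).mp (by simpa using he), ?_⟩
        intro c hc'; exact hc c (List.mem_reverse.mp hc')
      · exact ha q hq
  | cons c rest ih =>
    intro cur acc hc ha q hq
    rw [PySem.Chars.split₀.go.eq_def] at hq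
    dsimp only [] at hq
    by_cases hs : PySem.Chars.isspace c
    · rw [if_pos hs] at hq
      by_cases he : cur.isEmpty
      · rw [if_pos he] at hq
        exact ih [] acc (by simp) ha q hq
      · rw [if_neg he] at hq
        refine ih [] (cur.reverse :: acc) (by simp) ?_ q hq
        intro p hp
        rcases List.mem_cons.mp hp with rfl | hp
        · exact ⟨by simpa using (List.isEmpty_eq_false_iff ..).mp (by simpa using he),
            fun c' hc' => hc c' (List.mem_reverse.mp hc')⟩
        · exact ha p hp
    · rw [if_neg hs] at hq
      refine ih (c :: cur) acc ?_ ha q hq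
      intro c' hc'
      rcases List.mem_cons.mp hc' with rfl | hc'
      · simpa using hs
      · exact hc c' hc'

theorem pv_split₀_good (s : String) : ∀ w ∈ PySem.Str.split₀ s, pvGood w.toList := by
  intro w hw
  have hdef : PySem.Str.split₀ s = List.map String.ofList (PySem.Chars.split₀ s.toList) := rfl
  rw [hdef, List.mem_map] at hw
  obtain ⟨q, hq, rfl⟩ := hw
  have hg := pv_go_good s.toList [] [] (by simp) (by simp) q hq
  rw [String.toList_ofList]
  refine ⟨hg.1, fun hc => ?_⟩
  have := hg.2 ' ' hc
  exact absurd this (by decide)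

theorem pv_words_good (tl : List String) :
    ∀ w ∈ tl.foldl (fun acc t => acc ++ PySem.Str.split₀ (remove_punc_special t)) [],
      pvGood w.toList := by
  intro w hw
  rw [PySem.List.foldl_append_eq_flatMap, List.nil_append, List.mem_flatMap] at hw
  obtain ⟨t, _, hw⟩ := hw
  exact pv_split₀_good _ w hw

-- A's index loop from i = word-level scan of the remaining words
theorem pv_aScan_eq (ws : List String) : ∀ k i acc, ws.length - i ≤ k →
    aScan ws i acc = acc ++ (wScan ((ws.drop i).map String.toList)).map String.ofList := by
  intro k
  induction k with
  | zero =>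
    intro i acc hk
    rw [aScan, dif_neg (by omega), List.drop_of_length_le (by omega)]
    simp [wScan]
  | succ k ih =>
    intro i acc hk
    by_cases h : i < ws.length
    · have hgd : ws.getD i "" = ws[i] := by
        simp [List.getD_eq_getElem?_getD, List.getElem?_eq_getElem h]
      by_cases h2 : i < ws.length - 1
      · have h1 : i + 1 < ws.length := by omega
        have hgd1 : ws.getD (i + 1) "" = ws[i + 1] := by
          simp [List.getD_eq_getElem?_getD, List.getElem?_eq_getElem h1]
        have hdrop : ws.drop i = ws[i] :: ws[i + 1] :: ws.drop (i + 2) := by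
          rw [List.drop_eq_getElem_cons h]
          congr 1
          rw [List.drop_eq_getElem_cons h1]
        have hof2 : ws[i] ++ " " ++ ws[i + 1] = String.ofList (ws[i].toList ++ ' ' :: ws[i + 1].toList) := by
          rw [← String.toList_inj, String.toList_ofList]
          simp [String.toList_append]
        rw [aScan, dif_pos h, if_pos h2]
        simp only [hgd, hgd1, hdrop, List.map_cons, wScan, hof2]
        by_cases hc : PySem.Set.contains pvValidAttributes
            (String.ofList (ws[i].toList ++ ' ' :: ws[i + 1].toList)) = true
        · rw [if_pos hc, if_pos hc, ih _ _ (by omega)]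
          simp
        · have harg : List.map String.toList (List.drop (i + 1) ws)
              = ws[i + 1].toList :: List.map String.toList (List.drop (i + 2) ws) := by
            rw [List.drop_eq_getElem_cons h1, List.map_cons]
          rw [if_neg hc, if_neg hc, ih _ _ (by omega), harg,
            show String.ofList ws[i].toList = ws[i] from by rw [← String.toList_inj, String.toList_ofList]]
          by_cases hs : PySem.Set.contains pvValidAttributes ws[i] = true
          · rw [if_pos hs, if_pos hs]; simp
          · rw [if_neg hs, if_neg hs]; simp
      · have hdrop : ws.drop i = [ws[i]] := by
          rw [List.drop_eq_getElem_cons h, List.drop_of_length_le (by omega)]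
        rw [aScan, dif_pos h, if_neg h2, ih _ _ (by omega), List.drop_of_length_le (by omega)]
        simp only [hdrop, hgd, List.map_cons, List.map_nil, wScan]
        rw [show String.ofList ws[i].toList = ws[i] from by rw [← String.toList_inj, String.toList_ofList]]
        by_cases hs : PySem.Set.contains pvValidAttributes ws[i] = true
        · rw [if_pos hs, if_pos hs]; simp
        · rw [if_neg hs, if_neg hs]; simp
    · rw [aScan, dif_neg h, List.drop_of_length_le (by omega)]
      simp [wScan]

-- one-step unfolding of bScan with a plain match
theorem pv_bScan_unfold (s : List Char) (p : Nat) (found : List String) :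
    bScan s p found =
      if p < s.length then
        (if (p == 0 || s.getD (p - 1) 'a' == ' ') = true then
          (match bMatchAt s p with
           | some pat => bScan s (p + pat.length) (found ++ [String.ofList pat])
           | none => bScan s (p + 1) found)
        else bScan s (p + 1) found)
      else found := by
  rw [bScan]
  by_cases h : p < s.length
  · rw [dif_pos h, if_pos h]
    by_cases hb : (p == 0 || s.getD (p - 1) 'a' == ' ') = true
    · rw [if_pos hb, if_pos hb]
      cases hm : bMatchAt s p <;> simp
    · rw [if_neg hb, if_neg hb]
  · rw [dif_neg h, if_neg h]

-- the pattern search only looks at the string from position p on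
theorem pv_bMatchAt_shift (t s : List Char) (p : Nat) :
    bMatchAt (t ++ s) (t.length + p) = bMatchAt s p := by
  unfold bMatchAt
  congr 1
  funext pat
  have hd : (t ++ s).drop (t.length + p) = s.drop p := by
    rw [← List.drop_drop, List.drop_left]
  have hg : (t ++ s).getD (t.length + p + pat.length) 'a' = s.getD (p + pat.length) 'a' := by
    rw [Nat.add_assoc, List.getD_append_right _ _ _ _ (by omega)]
    congr 1
    omega
  have hl : ((t.length + p + pat.length == (t ++ s).length) : Bool)
      = ((p + pat.length == s.length) : Bool) := by
    rw [Bool.eq_iff_iff]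
    simp only [beq_iff_eq, List.length_append]
    omega
  rw [hd, hg, hl]

-- bScan only looks at the string from position p-1 on: a prefix may be cut off
theorem pv_bScan_shift (t s : List Char) : ∀ k p found, s.length - p ≤ k → 1 ≤ p →
    bScan (t ++ s) (t.length + p) found = bScan s p found := by
  intro k
  induction k with
  | zero =>
    intro p found hk hp
    conv_lhs => rw [pv_bScan_unfold]
    conv_rhs => rw [pv_bScan_unfold]
    rw [if_neg (by simp only [List.length_append]; omega), if_neg (by omega)]
  | succ k ih =>
    intro p found hk hp
    by_cases h : p < s.length
    · have hb : ((t.length + p == 0 || (t ++ s).getD (t.length + p - 1) 'a' == ' ') : Bool)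
          = ((p == 0 || s.getD (p - 1) 'a' == ' ') : Bool) := by
        have h0 : ((t.length + p == 0) : Bool) = ((p == 0) : Bool) := by
          rw [Bool.eq_iff_iff]; simp; omega
        have h1 : (t ++ s).getD (t.length + p - 1) 'a' = s.getD (p - 1) 'a' := by
          rw [show t.length + p - 1 = t.length + (p - 1) from by omega,
            List.getD_append_right _ _ _ _ (by omega)]
          congr 1
          omega
        rw [h0, h1]
      conv_lhs => rw [pv_bScan_unfold]
      conv_rhs => rw [pv_bScan_unfold]
      rw [if_pos (by simp only [List.length_append]; omega), if_pos h, hb, pv_bMatchAt_shift]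
      by_cases hbv : (p == 0 || s.getD (p - 1) 'a' == ' ') = true
      · rw [if_pos hbv, if_pos hbv]
        cases hm : bMatchAt s p with
        | some pat =>
          have hpos := pvPatternsC_pos pat (List.mem_of_find?_eq_some (by simpa [bMatchAt] using hm))
          dsimp only
          rw [show t.length + p + pat.length = t.length + (p + pat.length) from by omega]
          exact ih (p + pat.length) _ (by omega) (by omega)
        | none =>
          dsimp only
          rw [show t.length + p + 1 = t.length + (p + 1) from by omega]
          exact ih (p + 1) found (by omega) (by omega)
      · rw [if_neg hbv, if_neg hbv,
          show t.length + p + 1 = t.length + (p + 1) from by omega]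
        exact ih (p + 1) found (by omega) (by omega)
    · conv_lhs => rw [pv_bScan_unfold]
      conv_rhs => rw [pv_bScan_unfold]
      rw [if_neg (by simp only [List.length_append]; omega), if_neg (by omega)]

-- entering the scan right after a separator space = starting it on the rest
theorem pv_bScan_sep (u : List Char) (found : List String) :
    bScan (' ' :: u) 1 found = bScan u 0 found := by
  have hb0 : bMatchAt (' ' :: u) 1 = bMatchAt u 0 := by
    simpa using pv_bMatchAt_shift [' '] u 0
  have hsh : ∀ q found', 1 ≤ q → bScan (' ' :: u) (1 + q) found' = bScan u q found' := by
    intro q found' hq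
    simpa using pv_bScan_shift [' '] u u.length q found' (by omega) hq
  conv_lhs => rw [pv_bScan_unfold]
  conv_rhs => rw [pv_bScan_unfold]
  by_cases h : 0 < u.length
  · rw [if_pos (by simp only [List.length_cons]; omega), if_pos h, if_pos (by simp),
      if_pos (by simp), hb0]
    cases hm : bMatchAt u 0 with
    | some pat =>
      have hpos := pvPatternsC_pos pat (List.mem_of_find?_eq_some (by simpa [bMatchAt] using hm))
      dsimp only
      rw [hsh pat.length _ (by omega)]
      simp
    | none =>
      dsimp only
      simpa using hsh 1 found (le_refl 1)
  · rw [if_neg (by simp only [List.length_cons]; omega), if_neg (by omega)]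

-- stepping off the last character of a word whose last character is not a space
theorem pv_bScan_step_end (t u : List Char) (ht : 0 < t.length)
    (hl : t.getD (t.length - 1) 'a' ≠ ' ') (found : List String) :
    bScan (t ++ ' ' :: u) t.length found = bScan (t ++ ' ' :: u) (t.length + 1) found := by
  rw [pv_bScan_unfold, if_pos (by simp only [List.length_append, List.length_cons]; omega)]
  have hgd : (t ++ ' ' :: u).getD (t.length - 1) 'a' = t.getD (t.length - 1) 'a' :=
    List.getD_append _ _ _ _ (by omega)
  rw [if_neg (by
    simp only [Bool.or_eq_true, beq_iff_eq, hgd]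
    rintro (h | h)
    · omega
    · exact hl h)]

-- after a full word and its separator, the scan continues on the rest alone
theorem pv_bScan_after (t u : List Char) (found : List String) :
    bScan (t ++ ' ' :: u) (t.length + 1) found = bScan u 0 found := by
  rw [show t ++ ' ' :: u = t ++ (' ' :: u) from rfl,
    pv_bScan_shift t (' ' :: u) (' ' :: u).length 1 found (Nat.sub_le _ _) (le_refl 1),
    pv_bScan_sep]

-- no boundary inside a good word: the scan walks through it
theorem pv_bScan_walk (w rest : List Char) (hw : pvGood w) : ∀ k j found,
    w.length - j ≤ k → 1 ≤ j → j ≤ w.length →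
    bScan (w ++ rest) j found = bScan (w ++ rest) (w.length + 1) found := by
  have step : ∀ j found, 1 ≤ j → j ≤ w.length →
      bScan (w ++ rest) j found = bScan (w ++ rest) (j + 1) found := by
    intro j found hj1 hj2
    by_cases h : j < (w ++ rest).length
    · rw [pv_bScan_unfold, if_pos h]
      have hgd : (w ++ rest).getD (j - 1) 'a' = w[j - 1]'(by omega) := by
        rw [List.getD_append _ _ _ _ (by omega)]
        simp [List.getD_eq_getElem?_getD, List.getElem?_eq_getElem (show j - 1 < w.length by omega)]
      rw [if_neg (by
        simp only [Bool.or_eq_true, beq_iff_eq, hgd]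
        rintro (h | h)
        · omega
        · exact hw.2 (h ▸ List.getElem_mem _))]
    · rw [pv_bScan_unfold, if_neg h, pv_bScan_unfold, if_neg (by simp only [List.length_append] at h ⊢; omega)]
  intro k
  induction k with
  | zero =>
    intro j found hk hj1 hj2
    have : j = w.length := by omega
    subst this
    exact step _ _ hj1 hj2
  | succ k ih =>
    intro j found hk hj1 hj2
    by_cases hj : j = w.length
    · subst hj; exact step _ _ hj1 hj2
    · rw [step j found hj1 hj2]
      exact ih (j + 1) found (by omega) (by omega) (by omega)

-- a spaceless pattern matches at a word start iff it IS that word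
theorem pv_core (z w t : List Char) (hz : (' ' : Char) ∉ z) (hw : pvGood w)
    (ht : t = [] ∨ ∃ u, t = ' ' :: u) :
    (z.isPrefixOf (w ++ t) && ((z.length == (w ++ t).length) || ((w ++ t).getD z.length 'a' == ' ')))
      = decide (w = z) := by
  rw [Bool.eq_iff_iff]
  simp only [Bool.and_eq_true, Bool.or_eq_true, List.isPrefixOf_iff_prefix, beq_iff_eq,
    decide_eq_true_eq]
  constructor
  · rintro ⟨hpre, hb⟩
    obtain ⟨r, hr⟩ := hpre
    have hle : z.length ≤ w.length := by
      by_contra hgt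
      rw [Nat.not_le] at hgt
      have h1 : (w ++ t)[w.length]? = some ' ' := by
        rcases ht with rfl | ⟨u, rfl⟩
        · exfalso
          have := congrArg List.length hr
          simp at this
          omega
        · rw [List.getElem?_append_right (le_refl _)]; simp
      rw [← hr, List.getElem?_append_left hgt] at h1
      exact hz (List.mem_of_getElem? h1)
    rcases hb with hb | hb
    · have hlr := congrArg List.length hr
      simp only [List.length_append] at hlr
      have hb' : z.length = (w ++ t).length := hb
      simp only [List.length_append] at hb'
      have hr0 : r = [] := List.eq_nil_of_length_eq_zero (by omega)
      subst hr0
      rw [List.append_nil] at hr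
      have ht0 : t = [] := by
        have := congrArg List.length hr
        rcases ht with rfl | ⟨u, rfl⟩
        · rfl
        · simp at this; omega
      subst ht0
      rw [List.append_nil] at hr
      exact hr.symm
    · have hlt : ¬ z.length < w.length := by
        intro hlt
        rw [List.getD_append _ _ _ _ hlt] at hb
        have hb' : w[z.length]'hlt = ' ' := by
          rw [← hb]
          simp [List.getD_eq_getElem?_getD, List.getElem?_eq_getElem hlt]
        exact hw.2 (hb' ▸ List.getElem_mem _)
      have hlen : z.length = w.length := by omega
      exact ((List.append_inj hr hlen).1).symm
  · rintro rfl
    refine ⟨⟨t, rfl⟩, ?_⟩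
    rcases ht with rfl | ⟨u, rfl⟩
    · left; simp
    · right
      rw [List.getD_append_right _ _ _ _ (le_refl _)]
      simp

-- a one-space pattern matches at a word start iff it is that word followed by the next
theorem pv_core2 (x y w : List Char) (cws : List (List Char))
    (hx : (' ' : Char) ∉ x) (hy : (' ' : Char) ∉ y)
    (hw : pvGood w) (hg : ∀ v ∈ cws, pvGood v) :
    ((x ++ ' ' :: y).isPrefixOf (PySem.Chars.join [' '] (w :: cws))
      && (((x ++ ' ' :: y).length == (PySem.Chars.join [' '] (w :: cws)).length)
          || ((PySem.Chars.join [' '] (w :: cws)).getD (x ++ ' ' :: y).length 'a' == ' ')))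
      = decide (w = x ∧ cws.head? = some y) := by
  rcases cws with _ | ⟨n, rs⟩
  · rw [PySem.Chars.join_singleton]
    have hpre : ((x ++ ' ' :: y).isPrefixOf w) = false := by
      rw [Bool.eq_false_iff]
      intro hp
      obtain ⟨r, hr⟩ := List.isPrefixOf_iff_prefix.mp hp
      exact hw.2 (by rw [← hr]; simp)
    rw [hpre]
    simp
  · have hn : pvGood n := hg n (by simp)
    have hm : ∃ t2, PySem.Chars.join [' '] (n :: rs) = n ++ t2 ∧ (t2 = [] ∨ ∃ u, t2 = ' ' :: u) := by
      rcases rs with _ | ⟨r, rs'⟩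
      · exact ⟨[], by simp [PySem.Chars.join_singleton], Or.inl rfl⟩
      · refine ⟨' ' :: PySem.Chars.join [' '] (r :: rs'), ?_, Or.inr ⟨_, rfl⟩⟩
        rw [PySem.Chars.join_cons_cons]
        simp
    obtain ⟨t2, hmt, ht2⟩ := hm
    have hjoin : PySem.Chars.join [' '] (w :: n :: rs) = w ++ ' ' :: PySem.Chars.join [' '] (n :: rs) := by
      rw [PySem.Chars.join_cons_cons]
      simp
    rw [hjoin]
    rw [Bool.eq_iff_iff]
    simp only [Bool.and_eq_true, Bool.or_eq_true, List.isPrefixOf_iff_prefix, beq_iff_eq,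
      decide_eq_true_eq, List.head?_cons, Option.some.injEq]
    set m := PySem.Chars.join [' '] (n :: rs) with hmdef
    constructor
    · rintro ⟨hpre, hb⟩
      obtain ⟨r, hr⟩ := hpre
      have hr' : x ++ ' ' :: (y ++ r) = w ++ ' ' :: m := by
        rw [← hr]; simp
      obtain ⟨rfl, hyr⟩ := (pv_two_inj x (y ++ r) w m hx hw.2).mp hr'
      refine ⟨rfl, ?_⟩
      -- boundary transfers to m at position y.length
      have hbm : ((y.length == m.length) || (m.getD y.length 'a' == ' ')) = true := by
        rcases hb with hb | hb
        · have hml := congrArg List.length hyr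
          simp only [List.length_append, List.length_cons] at hb hml
          simp only [Bool.or_eq_true, beq_iff_eq]
          left
          omega
        · rw [show (x ++ ' ' :: y).length = x.length + (1 + y.length) from by
              simp only [List.length_append, List.length_cons]; omega,
            List.getD_append_right _ _ _ _ (by omega),
            show x.length + (1 + y.length) - x.length = y.length + 1 from by omega,
            List.getD_cons_succ] at hb
          simp only [Bool.or_eq_true, beq_iff_eq]
          right
          exact hb
      have hcore := pv_core y n t2 hy hn ht2
      rw [← hmt] at hcore
      have hpre' : y.isPrefixOf m = true := List.isPrefixOf_iff_prefix.mpr ⟨r, hyr⟩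
      have hexp : (y.isPrefixOf m && ((y.length == m.length) || (m.getD y.length 'a' == ' '))) = true := by
        rw [hpre', hbm]
        rfl
      exact of_decide_eq_true (hcore ▸ hexp)
    · rintro ⟨h1, h2⟩
      subst h1
      subst h2
      refine ⟨⟨t2, by rw [hmt]; simp⟩, ?_⟩
      rcases ht2 with rfl | ⟨u, rfl⟩
      · left
        rw [hmt]
        simp
      · right
        rw [hmt, show (w ++ ' ' :: n).length = w.length + (n.length + 1) from by
            simp only [List.length_append, List.length_cons],
          List.getD_append_right _ _ _ _ (by omega),
          show w.length + (n.length + 1) - w.length = n.length + 1 from by omega,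
          List.getD_cons_succ, List.getD_append_right _ _ _ _ (le_refl _)]
        simp

-- what the pattern search finds at a word boundary
theorem pv_findEq (w : List Char) (cws : List (List Char)) (hw : pvGood w)
    (hg : ∀ v ∈ cws, pvGood v) :
    bMatchAt (PySem.Chars.join [' '] (w :: cws)) 0 =
      (match cws with
       | n :: _ =>
         if PySem.Set.contains pvValidAttributes (String.ofList (w ++ ' ' :: n)) then
           some (w ++ ' ' :: n)
         else if PySem.Set.contains pvValidAttributes (String.ofList w) then some w else none
       | [] =>
         if PySem.Set.contains pvValidAttributes (String.ofList w) then some w else none) := by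
  unfold bMatchAt
  simp only [List.drop_zero, Nat.zero_add]
  rcases cws with _ | ⟨n, rs⟩
  · dsimp only
    rw [PySem.Chars.join_singleton]
    have hbig : ∀ x y : List Char, ((x ++ ' ' :: y).isPrefixOf w) = false := by
      intro x y
      rw [Bool.eq_false_iff]
      intro hp
      obtain ⟨r, hr⟩ := List.isPrefixOf_iff_prefix.mp hp
      exact hw.2 (by rw [← hr]; simp)
    have hone : ∀ z : List Char, (' ' : Char) ∉ z →
        (z.isPrefixOf w && ((z.length == w.length) || (w.getD z.length 'a' == ' ')))
          = decide (w = z) := by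
      intro z hz
      simpa using pv_core z w [] hz hw (Or.inl rfl)
    have h4 := hone "young".toList (by decide)
    have h5 := hone "male".toList (by decide)
    have h6 := hone "female".toList (by decide)
    have h7 := hone "smiling".toList (by decide)
    have h8 := hone "eyeglasses".toList (by decide)
    have h9 := hone "bald".toList (by decide)
    have h10 := hone "mustache".toList (by decide)
    rw [pv_contains_one w hw.2]
    simp only [pvPatternsC, List.find?_cons, List.find?_nil]
    rw [show "wearing lipstick".toList = "wearing".toList ++ ' ' :: "lipstick".toList from by decide,
      show "black hair".toList = "black".toList ++ ' ' :: "hair".toList from by decide,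
      show "blond hair".toList = "blond".toList ++ ' ' :: "hair".toList from by decide]
    simp only [hbig, Bool.false_and, h4, h5, h6, h7, h8, h9, h10]
    by_cases q4 : w = ['y', 'o', 'u', 'n', 'g']
    · subst q4; simp
    by_cases q5 : w = ['m', 'a', 'l', 'e']
    · subst q5; simp [q4]
    by_cases q6 : w = ['f', 'e', 'm', 'a', 'l', 'e']
    · subst q6; simp [q4, q5]
    by_cases q7 : w = ['s', 'm', 'i', 'l', 'i', 'n', 'g']
    · subst q7; simp [q4, q5, q6]
    by_cases q8 : w = ['e', 'y', 'e', 'g', 'l', 'a', 's', 's', 'e', 's']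
    · subst q8; simp [q4, q5, q6, q7]
    by_cases q9 : w = ['b', 'a', 'l', 'd']
    · subst q9; simp [q4, q5, q6, q7, q8]
    by_cases q10 : w = ['m', 'u', 's', 't', 'a', 'c', 'h', 'e']
    · subst q10; simp [q4, q5, q6, q7, q8, q9]
    simp [q4, q5, q6, q7, q8, q9, q10]
  · dsimp only
    have hj : PySem.Chars.join [' '] (w :: n :: rs)
        = w ++ ' ' :: PySem.Chars.join [' '] (n :: rs) := by
      rw [PySem.Chars.join_cons_cons]; simp
    have hone : ∀ z : List Char, (' ' : Char) ∉ z →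
        (z.isPrefixOf (PySem.Chars.join [' '] (w :: n :: rs))
          && ((z.length == (PySem.Chars.join [' '] (w :: n :: rs)).length)
              || ((PySem.Chars.join [' '] (w :: n :: rs)).getD z.length 'a' == ' ')))
          = decide (w = z) := by
      intro z hz
      rw [hj]
      exact pv_core z w _ hz hw (Or.inr ⟨_, rfl⟩)
    have htwo : ∀ x y : List Char, (' ' : Char) ∉ x → (' ' : Char) ∉ y →
        ((x ++ ' ' :: y).isPrefixOf (PySem.Chars.join [' '] (w :: n :: rs))
          && (((x ++ ' ' :: y).length == (PySem.Chars.join [' '] (w :: n :: rs)).length)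
              || ((PySem.Chars.join [' '] (w :: n :: rs)).getD (x ++ ' ' :: y).length 'a' == ' ')))
          = decide (w = x ∧ n = y) := by
      intro x y hx hy
      rw [pv_core2 x y w (n :: rs) hx hy hw hg]
      simp
    have e1 := htwo "wearing".toList "lipstick".toList (by decide) (by decide)
    have e2 := htwo "black".toList "hair".toList (by decide) (by decide)
    have e3 := htwo "blond".toList "hair".toList (by decide) (by decide)
    have h4 := hone "young".toList (by decide)
    have h5 := hone "male".toList (by decide)
    have h6 := hone "female".toList (by decide)
    have h7 := hone "smiling".toList (by decide)
    have h8 := hone "eyeglasses".toList (by decide)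
    have h9 := hone "bald".toList (by decide)
    have h10 := hone "mustache".toList (by decide)
    rw [pv_contains_two w n hw.2, pv_contains_one w hw.2]
    simp only [pvPatternsC, List.find?_cons, List.find?_nil]
    rw [show "wearing lipstick".toList = "wearing".toList ++ ' ' :: "lipstick".toList from by decide,
      show "black hair".toList = "black".toList ++ ' ' :: "hair".toList from by decide,
      show "blond hair".toList = "blond".toList ++ ' ' :: "hair".toList from by decide]
    simp only [e1, e2, e3, h4, h5, h6, h7, h8, h9, h10]
    by_cases q1 : w = ['w', 'e', 'a', 'r', 'i', 'n', 'g'] ∧ n = ['l', 'i', 'p', 's', 't', 'i', 'c', 'k']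
    · obtain ⟨rfl, rfl⟩ := q1; simp
    by_cases q2 : w = ['b', 'l', 'a', 'c', 'k'] ∧ n = ['h', 'a', 'i', 'r']
    · obtain ⟨rfl, rfl⟩ := q2; simp
    by_cases q3 : w = ['b', 'l', 'o', 'n', 'd'] ∧ n = ['h', 'a', 'i', 'r']
    · obtain ⟨rfl, rfl⟩ := q3; simp
    by_cases q4 : w = ['y', 'o', 'u', 'n', 'g']
    · subst q4; simp
    by_cases q5 : w = ['m', 'a', 'l', 'e']
    · subst q5; simp [q4]
    by_cases q6 : w = ['f', 'e', 'm', 'a', 'l', 'e']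
    · subst q6; simp [q4, q5]
    by_cases q7 : w = ['s', 'm', 'i', 'l', 'i', 'n', 'g']
    · subst q7; simp [q4, q5, q6]
    by_cases q8 : w = ['e', 'y', 'e', 'g', 'l', 'a', 's', 's', 'e', 's']
    · subst q8; simp [q4, q5, q6, q7]
    by_cases q9 : w = ['b', 'a', 'l', 'd']
    · subst q9; simp [q4, q5, q6, q7, q8]
    by_cases q10 : w = ['m', 'u', 's', 't', 'a', 'c', 'h', 'e']
    · subst q10; simp [q4, q5, q6, q7, q8, q9]
    simp [q1, q2, q3, q4, q5, q6, q7, q8, q9, q10]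

-- the character scan of the joined words = the word-level scan
theorem pv_good_lastD (v : List Char) (hv : pvGood v) : v.getD (v.length - 1) 'a' ≠ ' ' := by
  have hpos : 0 < v.length := List.length_pos_of_ne_nil hv.1
  have he : v.getD (v.length - 1) 'a' = v[v.length - 1]'(by omega) := by
    simp [List.getD_eq_getElem?_getD, List.getElem?_eq_getElem (show v.length - 1 < v.length by omega)]
  rw [he]
  intro hsp
  exact hv.2 (hsp ▸ List.getElem_mem _)

theorem pv_good_two_lastD (w n : List Char) (hn : pvGood n) :
    (w ++ ' ' :: n).getD ((w ++ ' ' :: n).length - 1) 'a' ≠ ' ' := by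
  have hnpos : 0 < n.length := List.length_pos_of_ne_nil hn.1
  rw [show (w ++ ' ' :: n).length = w.length + n.length + 1 from by
      simp only [List.length_append, List.length_cons]; omega,
    show w.length + n.length + 1 - 1 = w.length + n.length from by omega,
    List.getD_append_right _ _ _ _ (by omega),
    show w.length + n.length - w.length = (n.length - 1) + 1 from by omega,
    List.getD_cons_succ]
  simpa using pv_good_lastD n hn

-- the character scan of the joined words = the word-level scan
theorem pv_bScan_join : ∀ k (cws : List (List Char)), cws.length ≤ k →
    (∀ v ∈ cws, pvGood v) → ∀ found,
    bScan (PySem.Chars.join [' '] cws) 0 found = found ++ (wScan cws).map String.ofList := by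
  intro k
  induction k with
  | zero =>
    intro cws hk hg found
    have hnil : cws = [] := List.eq_nil_of_length_eq_zero (by omega)
    subst hnil
    rw [pv_bScan_unfold]
    simp [PySem.Chars.join_nil, wScan]
  | succ k ih =>
    intro cws hk hg found
    rcases cws with _ | ⟨w, cws⟩
    · rw [pv_bScan_unfold]
      simp [PySem.Chars.join_nil, wScan]
    · have hw : pvGood w := hg w (by simp)
      have hg' : ∀ v ∈ cws, pvGood v := fun v hv => hg v (by simp [hv])
      have hwpos : 0 < w.length := List.length_pos_of_ne_nil hw.1
      have hfind := pv_findEq w cws hw hg'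
      rcases cws with _ | ⟨n, rs⟩
      · -- a single word: the joined string is w itself
        dsimp only at hfind
        rw [PySem.Chars.join_singleton] at hfind ⊢
        conv_lhs => rw [pv_bScan_unfold]
        rw [if_pos (by omega), if_pos (by simp), hfind]
        by_cases hc : PySem.Set.contains pvValidAttributes (String.ofList w) = true
        · rw [if_pos hc]
          dsimp only
          rw [pv_bScan_unfold, if_neg (by omega)]
          simp only [wScan]
          rw [if_pos hc]
          simp
        · rw [if_neg hc]
          dsimp only
          rw [show bScan w 1 found = bScan w (w.length + 1) found from by
              simpa using pv_bScan_walk w [] hw w.length 1 found (by omega) (by omega) (by omega),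
            pv_bScan_unfold, if_neg (by omega)]
          simp only [wScan]
          rw [if_neg hc]
          simp
      · -- at least two words
        have hn : pvGood n := hg' n (by simp)
        have hj : PySem.Chars.join [' '] (w :: n :: rs)
            = w ++ ' ' :: PySem.Chars.join [' '] (n :: rs) := by
          rw [PySem.Chars.join_cons_cons]; simp
        dsimp only at hfind
        rw [hj] at hfind ⊢
        conv_lhs => rw [pv_bScan_unfold]
        rw [if_pos (by simp only [List.length_append, List.length_cons]; omega), if_pos (by simp),
          hfind]
        by_cases hc2 : PySem.Set.contains pvValidAttributes (String.ofList (w ++ ' ' :: n)) = true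
        · rw [if_pos hc2]
          dsimp only
          rw [Nat.zero_add]
          rcases rs with _ | ⟨r, rs'⟩
          · -- the pair is the whole input
            rw [PySem.Chars.join_singleton, pv_bScan_unfold, if_neg (by omega)]
            simp only [wScan]
            rw [if_pos hc2]
            simp
          · have hmn : PySem.Chars.join [' '] (n :: r :: rs')
                = n ++ ' ' :: PySem.Chars.join [' '] (r :: rs') := by
              rw [PySem.Chars.join_cons_cons]; simp
            rw [hmn, show w ++ ' ' :: (n ++ ' ' :: PySem.Chars.join [' '] (r :: rs'))
                = (w ++ ' ' :: n) ++ ' ' :: PySem.Chars.join [' '] (r :: rs') from by simp,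
              pv_bScan_step_end _ _ (by simp only [List.length_append, List.length_cons]; omega)
                (pv_good_two_lastD w n hn),
              pv_bScan_after,
              ih (r :: rs') (by simp at hk ⊢; omega) (fun v hv => hg' v (by simp [hv])) _]
            simp only [wScan]
            rw [if_pos hc2]
            simp
        · rw [if_neg hc2]
          by_cases hc1 : PySem.Set.contains pvValidAttributes (String.ofList w) = true
          · rw [if_pos hc1]
            dsimp only
            rw [Nat.zero_add,
              pv_bScan_step_end w _ hwpos (pv_good_lastD w hw),
              pv_bScan_after,
              ih (n :: rs) (by simp at hk ⊢; omega) hg' _]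
            simp only [wScan]
            rw [if_neg hc2, if_pos hc1]
            simp
          · rw [if_neg hc1]
            dsimp only
            rw [show bScan (w ++ ' ' :: PySem.Chars.join [' '] (n :: rs)) 1 found
                = bScan (w ++ ' ' :: PySem.Chars.join [' '] (n :: rs)) (w.length + 1) found from
                pv_bScan_walk w _ hw w.length 1 found (by omega) (by omega) (by omega),
              pv_bScan_after,
              ih (n :: rs) (by simp at hk ⊢; omega) hg' _]
            simp only [wScan]
            rw [if_neg hc2, if_neg hc1]
            simp

-- ===== VERDICT (by name: the statement is the Claim_ definition above) =====
theorem clean_and_validate_attributes_spec : Claim_equal_clean_and_validate_attributes := by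
  intro text_list _
  show clean_and_validate_attributes text_list = clean_and_validate_attributes_alt text_list
  unfold clean_and_validate_attributes clean_and_validate_attributes_alt
  rw [pv_aScan_eq _ (text_list.foldl (fun acc t => acc ++ PySem.Str.split₀ (remove_punc_special t)) []).length 0 [] (by omega)]
  rw [pv_bScan_join ((text_list.foldl (fun acc t => acc ++ PySem.Str.split₀ (remove_punc_special t)) []).map String.toList).length _ (by omega)
      (by intro v hv
          simp only [List.mem_map] at hv
          obtain ⟨w, hw, rfl⟩ := hv
          exact pv_words_good text_list w hw)]
  simp
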